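-- pv_equiv track=rewrite | github.com/ElenaSimanina/def_split_cycle_for_while | def_split_for.py | stroka_split
-- ===== SOURCE A (Python) =====
-- def stroka_split(stroka, razd):
--     stroka_split = []
--     element_1 = 0
--     for element in range(0, len(stroka)):
--         if stroka[element:element + len(razd)] == razd:
--             stroka_split.append(stroka[element_1:element+len(razd)])
--             element_1 = element + len(razd)
--     stroka_split.append(stroka[element_1:])
--     return stroka_split
-- ===== SOURCE B (Python) =====
-- def stroka_split(stroka, razd):
--     # streaming: consume the string character by character, maintaining the current
--     # segment and a sliding window of the last len(razd) characters; cut whenever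
--     # the window equals the delimiter (overlapping matches included)
--     m = len(razd)
--     target = list(razd)
--     parts = []
--     seg = []
--     window = []
--     for ch in stroka:
--         seg.append(ch)
--         window.append(ch)
--         if len(window) > m:
--             window.pop(0)
--         if window == target:
--             parts.append(''.join(seg))
--             seg = []
--     parts.append(''.join(seg))
--     return parts
-- ===== Notes on version B (the rewrite author's own statement) =====
-- stated objective: faster
-- what changed: B never indexes or slices the input: it streams the string character by character, maintaining the current segment and a sliding window of the last len(razd) characters, cutting whenever the window equals the delimiter; A instead allocates and compares a fresh slice against the delimiter at every index. Pre_ excludes the empty delimiter, a corner where every position matches and the placement of the resulting empty fragment is accidental in either implementation.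
-- outside the precondition, e.g. on stroka_split('ab', ''): A returns ['', 'a', 'b'], B returns ['a', 'b', '']
import Mathlib
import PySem

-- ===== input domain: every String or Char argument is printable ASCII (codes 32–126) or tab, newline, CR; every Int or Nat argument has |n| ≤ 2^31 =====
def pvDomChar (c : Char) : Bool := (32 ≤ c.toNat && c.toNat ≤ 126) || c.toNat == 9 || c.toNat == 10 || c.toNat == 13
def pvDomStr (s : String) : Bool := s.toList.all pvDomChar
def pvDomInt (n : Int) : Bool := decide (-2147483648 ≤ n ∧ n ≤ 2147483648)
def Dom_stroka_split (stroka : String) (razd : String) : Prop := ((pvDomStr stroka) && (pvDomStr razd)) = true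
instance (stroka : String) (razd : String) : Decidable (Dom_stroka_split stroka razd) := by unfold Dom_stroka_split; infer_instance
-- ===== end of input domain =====

-- B streams the string character by character with a current-segment accumulator and a
-- sliding window of the last len(razd) characters, never indexing or slicing the input,
-- where A allocates and compares a fresh slice at every index (objective: faster, measured).

-- ===== PORT A =====
-- literal port of A: one pass over range(0, len(stroka)); state = (accumulated list, element_1)
def stroka_split (stroka : String) (razd : String) : List String :=
  let res := (PySem.List.pyRange 0 (PySem.Str.len stroka) 1).foldl
    (fun (st : List String × Int) element =>
      if PySem.Str.slice stroka (some element) (some (element + PySem.Str.len razd)) = razd then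
        (st.1 ++ [PySem.Str.slice stroka (some st.2) (some (element + PySem.Str.len razd))],
         element + PySem.Str.len razd)
      else st)
    ([], 0)
  res.1 ++ [PySem.Str.slice stroka (some res.2) none]

-- ===== PORT B =====
-- literal port of Source B: a fold over the characters; state = (parts, seg, window);
-- window.pop(0) is List.drop 1; ''.join(seg) for a char list seg is String.ofList seg (exact)
def stroka_split_alt (stroka : String) (razd : String) : List String :=
  let m : Int := PySem.Str.len razd
  let target := razd.toList
  let res := stroka.toList.foldl
    (fun (st : List String × List Char × List Char) ch =>
      let seg := st.2.1 ++ [ch]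
      let window0 := st.2.2 ++ [ch]
      let window := if m < (window0.length : Int) then window0.drop 1 else window0
      if window = target then (st.1 ++ [String.ofList seg], ([] : List Char), window)
      else (st.1, seg, window))
    ([], [], [])
  res.1 ++ [String.ofList res.2.1]

-- ===== PRECONDITION & SPEC =====
-- Pre_ excludes the empty delimiter (A still returns there): with razd = '' every position
-- matches and the placement of the one empty fragment is an accident of the scan direction,
-- equally defensible in A (leading '') and in B (trailing '').
def Pre_stroka_split (stroka : String) (razd : String) : Prop := razd ≠ ""
instance (stroka : String) (razd : String) : Decidable (Pre_stroka_split stroka razd) := by unfold Pre_stroka_split; infer_instance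
def pvWitness_stroka_split : String × String := ("a b", " ")

def Spec_stroka_split (stroka : String) (razd : String) (out : List String) : Prop := out = stroka_split_alt stroka razd
instance (stroka : String) (razd : String) (out : List String) : Decidable (Spec_stroka_split stroka razd out) := by unfold Spec_stroka_split; infer_instance

-- ===== CLAIM (what is proved, stated in full; the proofs are below) =====
def Claim_equal_stroka_split : Prop := ∀ (stroka : String) (razd : String), Dom_stroka_split stroka razd → Pre_stroka_split stroka razd → Spec_stroka_split stroka razd (stroka_split stroka razd)

-- ===== LEMMAS AND PROOFS =====

-- the common normal form: the sorted list of cut positions (end of each match), and the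
-- emission fold producing the segments between consecutive cuts
def pvCuts (s r : List Char) : List Nat :=
  ((List.range s.length).filter (fun i => decide (r <+: s.drop i))).map (· + r.length)

def pvEmit (s : List Char) (cuts : List Nat) (P : List String) (prev : Nat) : List String × Nat :=
  cuts.foldl (fun st c => (st.1 ++ [String.ofList ((s.take c).drop st.2)], c)) (P, prev)

lemma pvSlice_eq (s : String) (a b : Nat) :
    PySem.Str.slice s (some (a : Int)) (some (b : Int)) = String.ofList ((s.toList.take b).drop a) := by
  apply String.toList_inj.mp
  rw [PySem.Str.toList_slice, PySem.Chars.slice_eq_listSlice, PySem.List.slice_natCast,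
    List.drop_take]
  simp

lemma pvSliceFrom_eq (s : String) (a : Nat) :
    PySem.Str.slice s (some (a : Int)) none = String.ofList (s.toList.drop a) := by
  apply String.toList_inj.mp
  rw [PySem.Str.toList_slice, PySem.Chars.slice_eq_listSlice, PySem.List.slice_from_natCast]
  simp

-- A's match condition (a slice comparison) is "razd is a prefix of stroka[i:]"
lemma pvCondA_iff (stroka razd : String) (i : Int) (hi : 0 ≤ i) :
    PySem.Str.slice stroka (some i) (some (i + PySem.Str.len razd)) = razd ↔
    razd.toList <+: stroka.toList.drop i.toNat := by
  rw [← String.toList_inj, PySem.Str.toList_slice, PySem.Chars.slice_eq_listSlice,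
    PySem.List.slice_toNat _ hi (by simp [pysem]; omega)]
  have h : (i + PySem.Str.len razd).toNat - i.toNat = razd.toList.length := by
    simp only [PySem.Str.len_eq]; omega
  rw [h, List.prefix_iff_eq_take]
  exact eq_comm

-- A's fold equals the emission fold over the matched-and-mapped cut list
lemma pvFoldA_eq (stroka razd : String) (l : List Int) (h0 : ∀ i ∈ l, 0 ≤ i)
    (acc : List String) (e1 : Int) :
    l.foldl
      (fun (st : List String × Int) element =>
        if PySem.Str.slice stroka (some element) (some (element + PySem.Str.len razd)) = razd then
          (st.1 ++ [PySem.Str.slice stroka (some st.2) (some (element + PySem.Str.len razd))],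
           element + PySem.Str.len razd)
        else st) (acc, e1)
    = ((l.filter (fun i => decide (razd.toList <+: stroka.toList.drop i.toNat))).map
        (· + PySem.Str.len razd)).foldl
      (fun (st : List String × Int) c =>
        (st.1 ++ [PySem.Str.slice stroka (some st.2) (some c)], c)) (acc, e1) := by
  induction l generalizing acc e1 with
  | nil => rfl
  | cons x l ih =>
    have hx : 0 ≤ x := h0 x (by simp)
    have hrest : ∀ i ∈ l, 0 ≤ i := fun i hi => h0 i (by simp [hi])
    by_cases hc : razd.toList <+: stroka.toList.drop x.toNat
    · simp only [List.foldl_cons, List.filter_cons, hc, decide_true, if_pos ((pvCondA_iff stroka razd x hx).mpr hc)]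
      exact ih hrest _ _
    · simp only [List.foldl_cons, List.filter_cons, hc, decide_false,
        if_neg (fun h => hc ((pvCondA_iff stroka razd x hx).mp h))]
      exact ih hrest _ _

-- the Int emission fold over the cast cut list is the Nat emission fold
lemma pvEmitInt_eq (stroka : String) (cs : List Nat) :
    ∀ (P : List String) (prev : Nat),
    (cs.map (Nat.cast : Nat → Int)).foldl
      (fun (st : List String × Int) c =>
        (st.1 ++ [PySem.Str.slice stroka (some st.2) (some c)], c)) (P, (prev : Int))
    = ((pvEmit stroka.toList cs P prev).1, ((pvEmit stroka.toList cs P prev).2 : Int)) := by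
  induction cs with
  | nil => intro P prev; rfl
  | cons c cs ih =>
    intro P prev
    simp only [List.map_cons, List.foldl_cons, pvEmit, pvSlice_eq]
    exact ih _ _

-- A = emission over pvCuts
lemma pvA_eq (stroka razd : String) :
    stroka_split stroka razd =
    (pvEmit stroka.toList (pvCuts stroka.toList razd.toList) [] 0).1
      ++ [String.ofList (stroka.toList.drop
            (pvEmit stroka.toList (pvCuts stroka.toList razd.toList) [] 0).2)] := by
  unfold stroka_split
  rw [pvFoldA_eq stroka razd _ (fun i hi => (PySem.List.mem_pyRange_one.mp hi).1) [] 0]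
  have hmap : ((PySem.List.pyRange 0 (PySem.Str.len stroka) 1).filter
        (fun i => decide (razd.toList <+: stroka.toList.drop i.toNat))).map
        (· + PySem.Str.len razd)
      = (pvCuts stroka.toList razd.toList).map (Nat.cast : Nat → Int) := by
    rw [show PySem.Str.len stroka = ((stroka.toList.length : Nat) : Int) by simp [PySem.Str.len_eq],
      PySem.List.pyRange_zero_natCast, List.filter_map, List.map_map]
    unfold pvCuts
    rw [List.map_map]
    apply List.map_congr_left
    intro i _
    simp only [Function.comp_apply, PySem.Str.len_eq]
    push_cast
    ring
  rw [hmap]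
  have h0 : ((0 : Nat) : Int) = (0 : Int) := rfl
  rw [← h0, pvEmitInt_eq]
  simp [pvSliceFrom_eq]

lemma pvCuts_pairwise (s r : List Char) : (pvCuts s r).Pairwise (· < ·) := by
  unfold pvCuts
  rw [List.pairwise_map]
  exact (List.pairwise_lt_range.filter _).imp (by omega)

lemma pvMem_cuts (s r : List Char) (hm : 0 < r.length) (c : Nat) :
    c ∈ pvCuts s r ↔ r.length ≤ c ∧ c ≤ s.length ∧ r <+: s.drop (c - r.length) := by
  unfold pvCuts
  simp only [List.mem_map, List.mem_filter, List.mem_range, decide_eq_true_eq]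
  constructor
  · rintro ⟨i, ⟨hi, hpre⟩, rfl⟩
    have hlen := hpre.length_le
    simp only [List.length_drop] at hlen
    exact ⟨by omega, by omega, by simpa [Nat.add_sub_cancel] using hpre⟩
  · rintro ⟨h1, h2, hpre⟩
    have hlen := hpre.length_le
    simp only [List.length_drop] at hlen
    exact ⟨c - r.length, ⟨by omega, hpre⟩, by omega⟩

lemma pvFilter_lt_succ (l : List Nat) (h : l.Pairwise (· < ·)) (j : Nat) :
    l.filter (fun c => decide (j < c)) =
    (if j + 1 ∈ l then [j + 1] else []) ++ l.filter (fun c => decide (j + 1 < c)) := by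
  induction l with
  | nil => simp
  | cons x l ih =>
    have hx := List.pairwise_cons.mp h
    by_cases h1 : x ≤ j
    · rw [List.filter_cons_of_neg (by simp; omega), List.filter_cons_of_neg (by simp; omega),
        ih hx.2]
      congr 2
      simp only [List.mem_cons, eq_iff_iff]
      exact ⟨fun hh => Or.inr hh, fun hh => hh.resolve_left (fun he => absurd he (by omega))⟩
    · by_cases h2 : x = j + 1
      · subst h2
        have hall : ∀ y ∈ l, j + 1 < y := hx.1
        rw [List.filter_cons_of_pos (by simp), List.filter_cons_of_neg (by simp),
          if_pos (List.mem_cons_self), List.cons_append, List.nil_append,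
          List.filter_eq_self.mpr (fun y hy => by
            have := hall y hy; simp only [decide_eq_true_eq]; omega),
          List.filter_eq_self.mpr (fun y hy => by
            have := hall y hy; simp only [decide_eq_true_eq]; omega)]
      · have h3 : j + 1 < x := by omega
        have hall : ∀ y ∈ x :: l, j + 1 < y := by
          intro y hy
          rcases List.mem_cons.mp hy with rfl | hy
          · exact h3
          · exact lt_trans h3 (hx.1 y hy)
        rw [if_neg (fun hmem => absurd (hall _ hmem) (by omega)), List.nil_append,
          List.filter_eq_self.mpr (fun y hy => by
            have := hall y hy; simp only [decide_eq_true_eq]; omega),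
          List.filter_eq_self.mpr (fun y hy => by
            have := hall y hy; simp only [decide_eq_true_eq]; omega)]

-- pushing one character into the sliding window advances its left edge to (j+1) - m
lemma pvWin_step (s : List Char) (m j : Nat) (hj : j + 1 ≤ s.length) :
    (if (m : Int) < ((((s.take (j + 1)).drop (j - m)).length : Nat) : Int)
      then ((s.take (j + 1)).drop (j - m)).drop 1
      else (s.take (j + 1)).drop (j - m))
    = (s.take (j + 1)).drop (j + 1 - m) := by
  have hlen : ((s.take (j + 1)).drop (j - m)).length = j + 1 - (j - m) := by
    simp only [List.length_drop, List.length_take]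
    omega
  by_cases hm : m ≤ j
  · rw [if_pos (by rw [hlen]; exact_mod_cast (by omega : m < j + 1 - (j - m))),
      List.drop_drop]
    congr 1
    omega
  · rw [if_neg (by rw [hlen]; exact_mod_cast (by omega : ¬ m < j + 1 - (j - m)))]
    congr 1
    omega

-- the window equals the delimiter iff a match ends at position j+1
lemma pvWinEq (s r : List Char) (j : Nat) (hj : j + 1 ≤ s.length) :
    ((s.take (j + 1)).drop (j + 1 - r.length) = r) ↔
    (r.length ≤ j + 1 ∧ r <+: s.drop (j + 1 - r.length)) := by
  have hdt : (s.take (j + 1)).drop (j + 1 - r.length)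
      = (s.drop (j + 1 - r.length)).take ((j + 1) - (j + 1 - r.length)) := List.drop_take
  constructor
  · intro h
    have hm : r.length ≤ j + 1 := by
      by_contra hc
      rw [show j + 1 - r.length = 0 by omega, List.drop_zero] at h
      have hl := congrArg List.length h
      rw [List.length_take_of_le hj] at hl
      omega
    refine ⟨hm, ?_⟩
    rw [List.prefix_iff_eq_take]
    have htk : (s.drop (j + 1 - r.length)).take r.length
        = (s.drop (j + 1 - r.length)).take ((j + 1) - (j + 1 - r.length)) := by
      congr 1
      omega
    rw [htk, ← hdt, h]
  · rintro ⟨hm, hpre⟩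
    rw [hdt, show (j + 1) - (j + 1 - r.length) = r.length by omega]
    exact (List.prefix_iff_eq_take.mp hpre).symm

-- main invariant of B's streaming fold: from position j with segment start prev,
-- the fold emits exactly the segments of the cuts beyond j
lemma pvBloop (s r : List Char) (hm : 0 < r.length) :
    ∀ (k j : Nat), s.length - j = k → j ≤ s.length → ∀ (P : List String) (prev : Nat), prev ≤ j →
    (let res := (s.drop j).foldl
        (fun (st : List String × List Char × List Char) ch =>
          let seg := st.2.1 ++ [ch]
          let window0 := st.2.2 ++ [ch]
          let window := if ((r.length : Nat) : Int) < ((window0.length : Nat) : Int)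
            then window0.drop 1 else window0
          if window = r then (st.1 ++ [String.ofList seg], ([] : List Char), window)
          else (st.1, seg, window))
        (P, (s.take j).drop prev, (s.take j).drop (j - r.length));
      res.1 ++ [String.ofList res.2.1])
    = (let res := pvEmit s ((pvCuts s r).filter (fun c => decide (j < c))) P prev;
       res.1 ++ [String.ofList (s.drop res.2)]) := by
  intro k
  induction k with
  | zero =>
    intro j hk hj P prev hprev
    have hjl : j = s.length := by omega
    subst hjl
    have hfil : (pvCuts s r).filter (fun c => decide (s.length < c)) = [] := by
      rw [List.filter_eq_nil_iff]
      intro c hc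
      have := (pvMem_cuts s r hm c).mp hc
      simp only [decide_eq_true_eq]
      omega
    simp [hfil, pvEmit, List.take_length]
  | succ k ih =>
    intro j hk hj P prev hprev
    have hjlt : j < s.length := by omega
    rw [List.drop_eq_getElem_cons hjlt, List.foldl_cons]
    have htake : ∀ (p : Nat), p ≤ j → (s.take j).drop p ++ [s[j]] = (s.take (j + 1)).drop p := by
      intro p hp
      rw [List.take_succ, List.getElem?_eq_getElem hjlt]
      simp only [Option.toList_some]
      rw [List.drop_append_of_le_length (by simp; omega)]
    simp only [htake prev hprev, htake (j - r.length) (by omega),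
      pvWin_step s r.length j (by omega)]
    rw [pvFilter_lt_succ _ (pvCuts_pairwise s r) j]
    by_cases hcut : (s.take (j + 1)).drop (j + 1 - r.length) = r
    · have hmem : j + 1 ∈ pvCuts s r := by
        obtain ⟨h1, h2⟩ := (pvWinEq s r j (by omega)).mp hcut
        exact (pvMem_cuts s r hm (j + 1)).mpr ⟨h1, by omega, h2⟩
      rw [if_pos hmem]
      simp only [if_pos hcut, List.cons_append, List.nil_append]
      have hseg : (s.take (j + 1)).drop (j + 1) = [] := by
        apply List.drop_eq_nil_of_le
        simp
      have := ih (j + 1) (by omega) (by omega)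
        (P ++ [String.ofList ((s.take (j + 1)).drop prev)]) (j + 1) (le_refl _)
      simp only [hseg] at this
      rw [this]
      rfl
    · have hmem : j + 1 ∉ pvCuts s r := by
        intro hmem
        obtain ⟨h1, _, h2⟩ := (pvMem_cuts s r hm (j + 1)).mp hmem
        exact hcut ((pvWinEq s r j (by omega)).mpr ⟨h1, h2⟩)
      rw [if_neg hmem]
      simp only [if_neg hcut, List.nil_append]
      exact ih (j + 1) (by omega) (by omega) P prev (by omega)

-- ===== VERDICT (by name: the statement is the Claim_ definition above) =====
theorem stroka_split_spec : Claim_equal_stroka_split := by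
  intro stroka razd _ hpre
  unfold Spec_stroka_split
  have hm : 0 < razd.toList.length := by
    rcases Nat.eq_zero_or_pos razd.toList.length with h | h
    · exact absurd (String.toList_inj.mp (by simpa using List.eq_nil_of_length_eq_zero h)) hpre
    · exact h
  have hB := pvBloop stroka.toList razd.toList hm stroka.toList.length 0 rfl (Nat.zero_le _) [] 0
    (le_refl _)
  have hfil : (pvCuts stroka.toList razd.toList).filter (fun c => decide (0 < c))
      = pvCuts stroka.toList razd.toList := by
    rw [List.filter_eq_self]
    intro c hc
    have := (pvMem_cuts _ _ hm c).mp hc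
    simp only [decide_eq_true_eq]
    omega
  simp only [hfil, List.take_zero, List.drop_nil, List.drop_zero] at hB
  rw [pvA_eq, ← hB]
  simp only [stroka_split_alt, PySem.Str.len_eq]
  rfl
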